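-- pv_equiv track=rewrite | github.com/mani-django09/smallpdf | pdf_tools/views.py | is_job_position
-- ===== SOURCE A (Python) =====
-- def is_job_position(text, current_section):
--     """Detect job position/title lines"""
--     if current_section not in ['EXPERIENCE', 'ORGANISATIONAL EXPERIENCE']:
--         return False
--
--     job_indicators = [
--         'working as', 'worked as', 'presently working',
--         'senior', 'analyst', 'executive', 'manager', 'associate'
--     ]
--
--     return any(indicator in text.lower() for indicator in job_indicators)
-- ===== SOURCE B (Python) =====
-- _JOB_INDICATORS = [
--     'working as', 'worked as', 'presently working',
--     'senior', 'analyst', 'executive', 'manager', 'associate'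
-- ]
--
-- # dispatch table: first character -> indicators starting with it
-- _BUCKETS = {}
-- for _ind in _JOB_INDICATORS:
--     _BUCKETS.setdefault(_ind[0], []).append(_ind)
--
--
-- def is_job_position(text, current_section):
--     """Detect job position/title lines: single left-to-right position scan of the
--     lowercased text, testing at each position only the indicators whose first
--     character matches (first-character dispatch table)."""
--     if current_section not in ('EXPERIENCE', 'ORGANISATIONAL EXPERIENCE'):
--         return False
--     low = text.lower()
--     for i, ch in enumerate(low):
--         for ind in _BUCKETS.get(ch, ()):
--             if low.startswith(ind, i):
--                 return True
--     return False
-- ===== Notes on version B (the rewrite author's own statement) =====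
-- stated objective: alternative
-- what changed: Instead of A's loop of eight whole-string substring searches, B scans the lowercased text once position by position and at each position consults a first-character dispatch dict so only the indicators starting with that character are prefix-tested.
import Mathlib
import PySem

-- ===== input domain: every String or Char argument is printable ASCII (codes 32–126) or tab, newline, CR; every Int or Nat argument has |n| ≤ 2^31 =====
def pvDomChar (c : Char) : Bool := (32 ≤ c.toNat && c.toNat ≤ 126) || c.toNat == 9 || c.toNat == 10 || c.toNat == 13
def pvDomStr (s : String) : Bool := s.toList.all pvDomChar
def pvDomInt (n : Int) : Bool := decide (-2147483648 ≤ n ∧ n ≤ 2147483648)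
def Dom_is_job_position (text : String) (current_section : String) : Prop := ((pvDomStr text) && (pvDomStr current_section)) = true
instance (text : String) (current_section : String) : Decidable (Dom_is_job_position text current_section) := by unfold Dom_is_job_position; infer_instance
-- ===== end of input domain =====

-- B replaces A's eight whole-string substring searches by one position-by-position
-- scan of the lowercased text with a first-character dispatch dict; objective: alternative.

-- ===== PORT A =====
def pvJobIndicators : List (List Char) :=
  [ "working as".toList, "worked as".toList, "presently working".toList,
    "senior".toList, "analyst".toList, "executive".toList, "manager".toList, "associate".toList ]

def is_job_position (text : String) (current_section : String) : Bool :=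
  if current_section ∉ ["EXPERIENCE", "ORGANISATIONAL EXPERIENCE"] then false
  else
    -- any(indicator in text.lower() for indicator in job_indicators)
    pvJobIndicators.any (fun ind => PySem.Chars.isIn ind (PySem.Str.lower text).toList)

-- ===== PORT B =====
-- module-level loop: _BUCKETS.setdefault(ind[0], []).append(ind)
def pvBuckets : PySem.Dict Char (List (List Char)) :=
  pvJobIndicators.foldl (fun d ind => d.modify ind.headI [] (· ++ [ind])) PySem.Dict.empty

-- for i, ch in enumerate(low): for ind in _BUCKETS.get(ch, ()): if low.startswith(ind, i): return True
def is_job_position_alt (text : String) (current_section : String) : Bool :=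
  if current_section = "EXPERIENCE" ∨ current_section = "ORGANISATIONAL EXPERIENCE" then
    let low := (PySem.Str.lower text).toList
    (PySem.List.enumerate low).any (fun p =>
      (pvBuckets.getD p.2 []).any (fun ind => ind.isPrefixOf (low.drop p.1.toNat)))
  else false

-- ===== PRECONDITION & SPEC =====
def Spec_is_job_position (text : String) (current_section : String) (out : Bool) : Prop := out = is_job_position_alt text current_section
instance (text : String) (current_section : String) (out : Bool) : Decidable (Spec_is_job_position text current_section out) := by unfold Spec_is_job_position; infer_instance

-- ===== CLAIM (what is proved, stated in full; the proofs are below) =====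
def Claim_equal_is_job_position : Prop := ∀ (text : String) (current_section : String), Dom_is_job_position text current_section → Spec_is_job_position text current_section (is_job_position text current_section)

-- ===== LEMMAS AND PROOFS =====

-- the dispatch dict, computed out
theorem pvBuckets_eq : pvBuckets = PySem.Dict.mk
    [ ('w', ["working as".toList, "worked as".toList]),
      ('p', ["presently working".toList]),
      ('s', ["senior".toList]),
      ('a', ["analyst".toList, "associate".toList]),
      ('e', ["executive".toList]),
      ('m', ["manager".toList]) ] := by decide

-- every bucket entry is one of the indicators
theorem pv_bucket_sub (ch : Char) (ind : List Char)
    (h : ind ∈ pvBuckets.getD ch []) : ind ∈ pvJobIndicators := by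
  rw [pvBuckets_eq] at h
  simp only [PySem.Dict.getD_eq_get?_getD, PySem.Dict.get?_mk_cons] at h
  split_ifs at h <;> simp_all [pvJobIndicators, PySem.Dict.get?] <;> tauto

-- each indicator sits in the bucket of its first character (finite check)
theorem pv_mem_own_bucket :
    ∀ ind ∈ pvJobIndicators, ind ∈ pvBuckets.getD ind.headI [] := by decide

theorem pv_indicators_ne_nil : ∀ ind ∈ pvJobIndicators, ind ≠ [] := by decide

-- A's membership test for one indicator ↔ a prefix match at some scanned position
theorem pv_isIn_iff (ind low : List Char) (hne : ind ≠ []) :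
    PySem.Chars.isIn ind low = true ↔
      ∃ j : Nat, j < low.length ∧ ind.isPrefixOf (low.drop j) = true := by
  rw [← PySem.Chars.exists_prefix_drop_iff_isIn]
  constructor
  · rintro ⟨j, hj⟩
    have hjlt : j < low.length := by
      by_contra hge
      have : low.drop j = [] := List.drop_eq_nil_of_le (by omega)
      rw [this] at hj
      exact hne (List.prefix_nil.mp hj)
    exact ⟨j, hjlt, List.isPrefixOf_iff_prefix.mpr hj⟩
  · rintro ⟨j, _, hj⟩
    exact ⟨j, List.isPrefixOf_iff_prefix.mp hj⟩

-- a prefix starting with a at position j pins low[j]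
theorem pv_get_of_prefix (low : List Char) (j : Nat) (a : Char) (tl : List Char)
    (h : (a :: tl) <+: low.drop j) : low[j]? = some a := by
  obtain ⟨t, ht⟩ := h
  have h0 : (low.drop j)[0]? = some a := by rw [← ht]; simp
  rwa [List.getElem?_drop, Nat.add_zero] at h0

theorem pv_body_eq (low : List Char) :
    pvJobIndicators.any (fun ind => PySem.Chars.isIn ind low) =
      (PySem.List.enumerate low).any (fun p =>
        (pvBuckets.getD p.2 []).any (fun ind => ind.isPrefixOf (low.drop p.1.toNat))) := by
  rw [Bool.eq_iff_iff]
  simp only [List.any_eq_true]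
  constructor
  · rintro ⟨ind, hind, h⟩
    obtain ⟨j, hjlt, hp⟩ := (pv_isIn_iff ind low (pv_indicators_ne_nil ind hind)).mp h
    refine ⟨((j : Int), low[j]), ?_, ind, ?_, ?_⟩
    · exact (PySem.List.mem_enumerate_iff _ _ _).mpr ⟨j, hjlt, by simp⟩
    · obtain ⟨a, tl, hi⟩ : ∃ a tl, ind = a :: tl := by
        cases ind with
        | nil => exact absurd rfl (pv_indicators_ne_nil [] hind)
        | cons a tl => exact ⟨a, tl, rfl⟩
      have hga : low[j]? = some a :=
        pv_get_of_prefix low j a tl (by rw [← hi]; exact List.isPrefixOf_iff_prefix.mp hp)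
      have hgj : low[j] = a := by
        have := List.getElem?_eq_getElem hjlt
        rw [this] at hga; exact Option.some.inj hga
      have := pv_mem_own_bucket ind hind
      rw [hi] at this
      simpa [hgj, hi] using this
    · simpa using hp
  · rintro ⟨p, hp, ind, hbucket, hpre⟩
    have hmem := pv_bucket_sub p.2 ind hbucket
    refine ⟨ind, hmem, ?_⟩
    obtain ⟨k, hk, hpk⟩ := (PySem.List.mem_enumerate_iff _ _ _).mp hp
    apply (pv_isIn_iff ind low (pv_indicators_ne_nil ind hmem)).mpr
    refine ⟨k, hk, ?_⟩
    have hkk : p.1.toNat = k := by rw [hpk]; simp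
    rwa [hkk] at hpre

-- ===== VERDICT (by name: the statement is the Claim_ definition above) =====
theorem is_job_position_spec : Claim_equal_is_job_position := by
  intro text current_section _
  unfold Spec_is_job_position is_job_position is_job_position_alt
  by_cases h : current_section = "EXPERIENCE" ∨ current_section = "ORGANISATIONAL EXPERIENCE"
  · rw [if_pos h, if_neg (by simp; tauto)]
    exact pv_body_eq _
  · rw [if_pos (by simpa using h), if_neg h]
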